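-- pv_equiv track=rewrite | github.com/jinokiim/algorithmstudy | archive/02.programmers/LV1/15. 최소직사각형.py | solution
-- ===== SOURCE A (Python) =====
-- def solution(sizes):
--     width = 0
--     height = 0
--
--     for i in range(len(sizes)):
--         # 인덱스에서 가로가 더 길다면
--         if sizes[i][0] > sizes[i][1]:
--             # 가로세로를 바꾸어서 width, height 최신화
--             width = max(width, sizes[i][1])
--             height = max(height, sizes[i][0])
--         else: # 아닐경우엔 그대로 width, height 입력
--             width = max(width, sizes[i][0])
--             height = max(height, sizes[i][1])
--     # 넓이 return
--     return width*height
-- ===== SOURCE B (Python) =====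
-- def _dims(sizes):
--     # divide and conquer: smallest enclosing (width, height) envelope of the cards
--     n = len(sizes)
--     if n == 0:
--         return (0, 0)
--     if n == 1:
--         a, b = sizes[0][0], sizes[0][1]
--         # join the single card (short side, long side) with the empty 0x0 envelope
--         return (max(0, min(a, b)), max(0, max(a, b)))
--     mid = n // 2
--     w1, h1 = _dims(sizes[:mid])
--     w2, h2 = _dims(sizes[mid:])
--     return (max(w1, w2), max(h1, h2))
--
--
-- def solution(sizes):
--     w, h = _dims(sizes)
--     return w * h
-- ===== Notes on version B (the rewrite author's own statement) =====
-- stated objective: alternative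
-- what changed: Replaces A's single left-to-right loop with two running accumulators and a swap branch by a divide-and-conquer recursion that halves the list, computes the (width,height) envelope of each half independently, and joins them by componentwise max; each card is normalised to (short side, long side) at the leaf instead of A's [0]>[1] branch.
import Mathlib
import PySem

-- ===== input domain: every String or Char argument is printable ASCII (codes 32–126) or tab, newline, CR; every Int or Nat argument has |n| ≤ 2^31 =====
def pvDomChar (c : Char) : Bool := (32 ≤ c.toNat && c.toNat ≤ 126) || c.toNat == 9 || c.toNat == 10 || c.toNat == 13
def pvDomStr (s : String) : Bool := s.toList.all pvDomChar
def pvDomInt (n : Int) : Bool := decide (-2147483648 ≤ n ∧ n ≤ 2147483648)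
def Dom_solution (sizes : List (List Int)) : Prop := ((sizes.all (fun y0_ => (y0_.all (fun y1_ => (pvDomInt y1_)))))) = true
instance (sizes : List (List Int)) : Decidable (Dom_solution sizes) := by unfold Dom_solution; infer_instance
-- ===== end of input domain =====

-- B replaces A's fused swap-branch loop by a divide-and-conquer recursion that halves the
-- list and joins the two halves' (width, height) envelopes by componentwise max.

-- s[i]; Pre_ guarantees every index used is in range, so the default is never consulted.
def pvSide (s : List Int) (i : Int) : Int := (PySem.List.pyGet? s i).getD 0

-- ===== PORT A =====
def solution (sizes : List (List Int)) : Int :=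
  let wh := sizes.foldl
    (fun (wh : Int × Int) s =>
      if pvSide s 0 > pvSide s 1 then
        (max wh.1 (pvSide s 1), max wh.2 (pvSide s 0))
      else
        (max wh.1 (pvSide s 0), max wh.2 (pvSide s 1)))
    (0, 0)
  wh.1 * wh.2

-- ===== PORT B =====
-- _dims: sizes[:mid] / sizes[mid:] are take/drop (exact here: 0 ≤ mid ≤ len).
def pvDims (sizes : List (List Int)) : Int × Int :=
  if sizes.length = 0 then (0, 0)
  else if sizes.length = 1 then
    let s0 := (PySem.List.pyGet? sizes 0).getD []
    let a := pvSide s0 0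
    let b := pvSide s0 1
    (max 0 (min a b), max 0 (max a b))
  else
    let mid := sizes.length / 2
    let d1 := pvDims (sizes.take mid)
    let d2 := pvDims (sizes.drop mid)
    (max d1.1 d2.1, max d1.2 d2.2)
termination_by sizes.length
decreasing_by
  · simp only [List.length_take]; omega
  · simp only [List.length_drop]; omega

def solution_alt (sizes : List (List Int)) : Int :=
  let wh := pvDims sizes
  wh.1 * wh.2

-- ===== PRECONDITION & SPEC =====
-- A (and B) raise IndexError on any card with fewer than 2 entries; exactly those are excluded.
def Pre_solution (sizes : List (List Int)) : Prop := ∀ s ∈ sizes, 2 ≤ s.length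
instance (sizes : List (List Int)) : Decidable (Pre_solution sizes) := by unfold Pre_solution; infer_instance
def pvWitness_solution : List (List Int) := [[3, 10], [7, 2]]

def Spec_solution (sizes : List (List Int)) (out : Int) : Prop := out = solution_alt sizes
instance (sizes : List (List Int)) (out : Int) : Decidable (Spec_solution sizes out) := by unfold Spec_solution; infer_instance

-- ===== CLAIM =====
def Claim_equal_solution : Prop := ∀ (sizes : List (List Int)), Dom_solution sizes → Pre_solution sizes → Spec_solution sizes (solution sizes)

-- ===== LEMMAS AND PROOFS =====
theorem foldl_max_shift (l : List Int) : ∀ (a b : Int),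
    l.foldl max (max a b) = max a (l.foldl max b) := by
  induction l with
  | nil => intro a b; rfl
  | cons x t ih =>
      intro a b
      simp only [List.foldl_cons]
      rw [show max (max a b) x = max a (max b x) by omega, ih]

theorem le_foldl_max (l : List Int) : ∀ (z : Int), z ≤ l.foldl max z := by
  induction l with
  | nil => intro z; exact le_refl z
  | cons x t ih =>
      intro z
      simp only [List.foldl_cons]
      exact le_trans (le_max_left z x) (ih _)

theorem foldl_max_append (f : List Int → Int) (l1 l2 : List (List Int)) :
    (((l1 ++ l2).map f).foldl max 0)
      = max ((l1.map f).foldl max 0) ((l2.map f).foldl max 0) := by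
  rw [List.map_append, List.foldl_append]
  have h0 : (0:Int) ≤ (l1.map f).foldl max 0 := le_foldl_max _ 0
  have h := foldl_max_shift (l2.map f) ((l1.map f).foldl max 0) 0
  rw [max_eq_left h0] at h
  exact h

theorem pvDims_eq (sizes : List (List Int)) :
    pvDims sizes
      = ((sizes.map (fun s => min (pvSide s 0) (pvSide s 1))).foldl max 0,
         (sizes.map (fun s => max (pvSide s 0) (pvSide s 1))).foldl max 0) := by
  fun_induction pvDims sizes with
  | case1 sizes h0 =>
      rw [List.length_eq_zero_iff.mp h0]; rfl
  | case2 sizes h0 h1 =>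
      obtain ⟨s, rfl⟩ := List.length_eq_one_iff.mp h1
      simp only [List.map_cons, List.map_nil, List.foldl_cons, List.foldl_nil]
      rfl
  | case3 sizes h0 h1 mid d1 d2 ih1 ih2 =>
      simp only [mid, d1, d2] at ih1 ih2 ⊢
      rw [ih1, ih2]
      have hsplit := List.take_append_drop (sizes.length / 2) sizes
      conv_rhs => rw [← hsplit]
      rw [foldl_max_append, foldl_max_append]

theorem solution_fold_eq (sizes : List (List Int)) : ∀ (w h : Int),
    sizes.foldl
      (fun (wh : Int × Int) s =>
        if pvSide s 0 > pvSide s 1 then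
          (max wh.1 (pvSide s 1), max wh.2 (pvSide s 0))
        else
          (max wh.1 (pvSide s 0), max wh.2 (pvSide s 1)))
      (w, h)
    = ((sizes.map (fun s => min (pvSide s 0) (pvSide s 1))).foldl max w,
       (sizes.map (fun s => max (pvSide s 0) (pvSide s 1))).foldl max h) := by
  induction sizes with
  | nil => intro w h; simp
  | cons s rest ih =>
      intro w h
      simp only [List.foldl_cons, List.map_cons]
      by_cases hgt : pvSide s 0 > pvSide s 1
      · simp only [if_pos hgt, ih]
        congr 1 <;> congr 1 <;> omega
      · simp only [if_neg hgt, ih]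
        congr 1 <;> congr 1 <;> omega

-- ===== VERDICT =====
theorem solution_spec : Claim_equal_solution := by
  intro sizes _ _
  unfold Spec_solution solution solution_alt
  rw [solution_fold_eq, pvDims_eq]
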